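-- pv_equiv track=rewrite | github.com/pj-99/upnp-desc-to-yang | src/upnpdesc2yang/common/util.py | extract_groupings
-- ===== SOURCE A (Python) =====
-- def extract_groupings(yang_content, exclude):
--     """
--     Extracts groupings from the given YANG content.
--
--     Returns:
--         dict: A dictionary where the keys are grouping names and the values are content.
--         str: The cleaned YANG content without groupings.
--     """
--     groupings = {}
--     lines = yang_content.split("\n")
--     current_grouping = None
--     current_content = []
--     brace_count = 0
--
--     cleaned_content = []
--
--     for line in lines:
--         stripped_line = line.strip()
--
--         # Enter grouping and start counting braces
--         # Count until braces are balanced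
--         if not current_grouping and stripped_line.startswith("grouping"):
--             grouping_name = stripped_line.split()[1]
--             if grouping_name not in exclude:
--                 current_grouping = grouping_name
--
--         if current_grouping:
--             current_content.append(line)
--             if "{" in stripped_line:
--                 brace_count += 1
--             if "}" in stripped_line:
--                 brace_count -= 1
--
--             # If brace count is zero, we have reached the end of the grouping
--             if brace_count == 0:
--                 groupings[current_grouping] = "\n".join(current_content)
--                 current_grouping = None
--                 current_content = []
--         else:
--             cleaned_content.append(line)
--     cleaned_content = "\n".join(cleaned_content)
--     return groupings, cleaned_content
-- ===== SOURCE B (Python) =====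
-- def extract_groupings(yang_content, exclude):
--     """Index-based rewrite: an outer scan over the lines consumes each
--     non-excluded grouping block with an inner brace-counting loop; all other
--     lines go straight to the cleaned output."""
--     lines = yang_content.split("\n")
--     groupings = {}
--     cleaned = []
--     n = len(lines)
--     i = 0
--     while i < n:
--         stripped = lines[i].strip()
--         if stripped.startswith("grouping") and stripped.split()[1] not in exclude:
--             name = stripped.split()[1]
--             block = []
--             count = 0
--             j = i
--             while j < n:
--                 s = lines[j].strip()
--                 count += ('{' in s) - ('}' in s)
--                 block.append(lines[j])
--                 j += 1
--                 if count == 0: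
--                     groupings[name] = "\n".join(block)
--                     break
--             i = j
--         else:
--             cleaned.append(lines[i])
--             i += 1
--     return groupings, "\n".join(cleaned)
-- ===== Notes on version B (the rewrite author's own statement) =====
-- stated objective: alternative
-- what changed: A threads a current-grouping/brace-count/content state machine through one fold over all lines; B is an outer scan that, on each non-excluded grouping header, delegates to an inner brace-counting loop that consumes the whole block and returns the remaining lines.
import Mathlib
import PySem

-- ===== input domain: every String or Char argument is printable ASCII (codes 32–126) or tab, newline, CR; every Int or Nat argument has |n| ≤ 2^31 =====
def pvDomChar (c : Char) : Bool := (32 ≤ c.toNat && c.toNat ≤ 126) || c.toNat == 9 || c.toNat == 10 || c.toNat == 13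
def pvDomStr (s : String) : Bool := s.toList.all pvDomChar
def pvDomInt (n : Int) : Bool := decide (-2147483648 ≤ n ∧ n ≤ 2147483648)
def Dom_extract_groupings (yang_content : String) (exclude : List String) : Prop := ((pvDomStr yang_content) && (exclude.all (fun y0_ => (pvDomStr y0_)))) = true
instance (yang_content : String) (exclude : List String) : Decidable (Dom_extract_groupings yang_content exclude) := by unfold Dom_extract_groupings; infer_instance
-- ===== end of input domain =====

-- B replaces A's per-line grouping/brace state machine by an outer scan that hands each
-- non-excluded grouping block to an inner brace-counting consumer (objective: alternative decomposition).

-- ===== PORT A =====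
-- one iteration of A's for-loop; state = (groupings, current_grouping, current_content, brace_count, cleaned)
def egA_step (exclude : List String)
    (st : PySem.Dict String String × Option String × List String × Int × List String)
    (line : String) : PySem.Dict String String × Option String × List String × Int × List String :=
  let (groupings, cur, content, bc, cleaned) := st
  let stripped := PySem.Str.strip line
  let cur :=
    if cur.isNone && PySem.Str.startswith stripped "grouping" then
      -- stripped_line.split()[1]: Python raises IndexError when there is no 2nd token;
      -- those inputs are excluded by Pre_, the default "" is never reached inside Pre_
      let name := PySem.List.pyGetD (PySem.Str.split₀ stripped) 1 ""
      if exclude.contains name then cur else some name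
    else cur
  match cur with
  | some g =>
    let content := content ++ [line]
    let bc := bc + (if PySem.Str.isIn "{" stripped then 1 else 0)
    let bc := bc - (if PySem.Str.isIn "}" stripped then 1 else 0)
    if bc = 0 then (groupings.insert g (PySem.Str.join "\n" content), none, [], bc, cleaned)
    else (groupings, some g, content, bc, cleaned)
  | none => (groupings, none, content, bc, cleaned ++ [line])

def extract_groupings (yang_content : String) (exclude : List String) : (List (String × String)) × String :=
  let lines := (PySem.Str.split? yang_content "\n").getD []   -- sep "\n" ≠ "": split? is always some
  let st := lines.foldl (egA_step exclude) (PySem.Dict.empty, none, [], 0, [])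
  (st.1.items, PySem.Str.join "\n" st.2.2.2.2)

-- ===== PORT B =====
-- Source B's "count += ('{' in s) - ('}' in s)"
def egDelta (s : String) : Int :=
  (if PySem.Str.isIn "{" s then 1 else 0) - (if PySem.Str.isIn "}" s then 1 else 0)

-- B's inner while-loop: consume lines into a block, one delta per line; returns the
-- finished block (none if the input ran out first) and the remaining lines
def egB_consume (lines : List String) (cnt : Int) (acc : List String) :
    Option (List String) × List String :=
  match lines with
  | [] => (none, [])
  | l :: rest =>
    let cnt' := cnt + egDelta (PySem.Str.strip l)
    let acc' := acc ++ [l]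
    if cnt' = 0 then (some acc', rest) else egB_consume rest cnt' acc'

-- termination helpers for the outer loop (cited by decreasing_by)
theorem egB_consume_len (lines : List String) : ∀ (cnt : Int) (acc : List String),
    (egB_consume lines cnt acc).2.length ≤ lines.length := by
  induction lines with
  | nil => intro cnt acc; simp [egB_consume]
  | cons l rest ih =>
    intro cnt acc
    by_cases h : cnt + egDelta (PySem.Str.strip l) = 0
    · simp [egB_consume, h]
    · simp only [egB_consume, if_neg h]
      exact le_trans (ih _ _) (Nat.le_succ _)

theorem egB_consume_cons_lt (l : String) (rest : List String) (cnt : Int) (acc : List String) :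
    (egB_consume (l :: rest) cnt acc).2.length < (l :: rest).length := by
  by_cases h : cnt + egDelta (PySem.Str.strip l) = 0
  · simp [egB_consume, h]
  · simp only [egB_consume, if_neg h, List.length_cons]
    exact Nat.lt_succ_of_le (egB_consume_len rest _ _)

-- B's outer while-loop over the remaining lines
set_option maxHeartbeats 1000000 in
def egB_outer (exclude : List String) (lines : List String)
    (groupings : PySem.Dict String String) (cleaned : List String) :
    PySem.Dict String String × List String :=
  match lines with
  | [] => (groupings, cleaned)
  | l :: rest =>
    let s := PySem.Str.strip l
    if PySem.Str.startswith s "grouping" &&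
        !(exclude.contains (PySem.List.pyGetD (PySem.Str.split₀ s) 1 "")) then
      -- stripped.split()[1]: IndexError in Python when no 2nd token, excluded by Pre_
      let name := PySem.List.pyGetD (PySem.Str.split₀ s) 1 ""
      let r := egB_consume (l :: rest) 0 []
      match r.1 with
      | some block =>
        egB_outer exclude r.2 (groupings.insert name (PySem.Str.join "\n" block)) cleaned
      | none => egB_outer exclude r.2 groupings cleaned
    else egB_outer exclude rest groupings (cleaned ++ [l])
  termination_by lines.length
  decreasing_by
  · exact egB_consume_cons_lt l rest 0 []
  · exact egB_consume_cons_lt l rest 0 []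
  · simp

def extract_groupings_alt (yang_content : String) (exclude : List String) : (List (String × String)) × String :=
  let lines := (PySem.Str.split? yang_content "\n").getD []   -- sep "\n" ≠ "": split? is always some
  let r := egB_outer exclude lines PySem.Dict.empty []
  (r.1.items, PySem.Str.join "\n" r.2)

-- ===== PRECONDITION & SPEC =====
-- A raises IndexError on split()[1] when a line outside a grouping strips to something that
-- starts with "grouping" but has no second whitespace-token; we exclude every such line
-- (slightly narrower than exact: such a line INSIDE a grouping block would not raise,
-- but "outside a grouping" is algorithm state, not a closed form on the input).
def Pre_extract_groupings (yang_content : String) (exclude : List String) : Prop :=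
  ∀ l ∈ (PySem.Str.split? yang_content "\n").getD [],
    PySem.Str.startswith (PySem.Str.strip l) "grouping" = true →
    2 ≤ (PySem.Str.split₀ (PySem.Str.strip l)).length
instance (yang_content : String) (exclude : List String) : Decidable (Pre_extract_groupings yang_content exclude) := by unfold Pre_extract_groupings; infer_instance

def pvWitness_extract_groupings : String × List String :=
  ("grouping g {\n  leaf x;\n}\nmodule m;", ["h"])

def Spec_extract_groupings (yang_content : String) (exclude : List String) (out : (List (String × String)) × String) : Prop := out = extract_groupings_alt yang_content exclude
instance (yang_content : String) (exclude : List String) (out : (List (String × String)) × String) : Decidable (Spec_extract_groupings yang_content exclude out) := by unfold Spec_extract_groupings; infer_instance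

-- ===== CLAIM (what is proved, stated in full; the proofs are below) =====
def Claim_equal_extract_groupings : Prop := ∀ (yang_content : String) (exclude : List String), Dom_extract_groupings yang_content exclude → Pre_extract_groupings yang_content exclude → Spec_extract_groupings yang_content exclude (extract_groupings yang_content exclude)

-- ===== LEMMAS AND PROOFS =====

-- project A's loop state to what the function returns
def egFin (st : PySem.Dict String String × Option String × List String × Int × List String) :
    PySem.Dict String String × List String := (st.1, st.2.2.2.2)

-- A's step while inside a grouping, written with B's delta
theorem egA_step_inside (exclude : List String) (g : PySem.Dict String String)
    (name : String) (acc cl : List String) (cnt : Int) (l : String) :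
    egA_step exclude (g, some name, acc, cnt, cl) l =
      if cnt + egDelta (PySem.Str.strip l) = 0 then
        (g.insert name (PySem.Str.join "\n" (acc ++ [l])), none, [],
          cnt + egDelta (PySem.Str.strip l), cl)
      else (g, some name, acc ++ [l], cnt + egDelta (PySem.Str.strip l), cl) := by
  by_cases h1 : PySem.Str.isIn "{" (PySem.Str.strip l) = true <;>
    by_cases h2 : PySem.Str.isIn "}" (PySem.Str.strip l) = true <;>
      simp [egA_step, egDelta] <;> split_ifs with h3 h4 <;> simp_all <;> omega

-- A's step while outside a grouping, on a non-excluded grouping header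
theorem egA_step_header (exclude : List String) (g : PySem.Dict String String)
    (cl : List String) (l : String)
    (hsw : PySem.Str.startswith (PySem.Str.strip l) "grouping" = true)
    (hnex : exclude.contains (PySem.List.pyGetD (PySem.Str.split₀ (PySem.Str.strip l)) 1 "") = false) :
    egA_step exclude (g, none, [], 0, cl) l =
      egA_step exclude
        (g, some (PySem.List.pyGetD (PySem.Str.split₀ (PySem.Str.strip l)) 1 ""), [], 0, cl) l := by
  have hsw' : PySem.Chars.startswith (PySem.Chars.strip l.toList)
       ['g','r','o','u','p','i','n','g'] = true := by simpa using hsw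
  have hnex' : PySem.List.pyGetD (PySem.Str.split₀ (PySem.Str.strip l)) 1 "" ∉ exclude := by
    simpa using hnex
  simp [egA_step, hsw', hnex']

-- A's step while outside a grouping, on an ordinary / excluded line
theorem egA_step_plain (exclude : List String) (g : PySem.Dict String String)
    (cl : List String) (l : String)
    (h : (PySem.Str.startswith (PySem.Str.strip l) "grouping" &&
          !(exclude.contains (PySem.List.pyGetD (PySem.Str.split₀ (PySem.Str.strip l)) 1 ""))) = false) :
    egA_step exclude (g, none, [], 0, cl) l = (g, none, [], 0, cl ++ [l]) := by
  rcases Bool.and_eq_false_iff.mp h with hsw | hnex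
  · have hsw' : PySem.Chars.startswith (PySem.Chars.strip l.toList)
        ['g','r','o','u','p','i','n','g'] = false := by simpa using hsw
    simp [egA_step, hsw']
  · have hx : exclude.contains (PySem.List.pyGetD (PySem.Str.split₀ (PySem.Str.strip l)) 1 "")
        = true := by simpa using hnex
    simp only [egA_step, Option.isNone_none, Bool.true_and]
    split <;> simp_all

-- the none branch of egB_consume always reports an empty remainder
theorem egB_consume_none_rest (lines : List String) : ∀ (cnt : Int) (acc : List String),
    (egB_consume lines cnt acc).1 = none → (egB_consume lines cnt acc).2 = [] := by
  induction lines with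
  | nil => intro cnt acc _; simp [egB_consume]
  | cons l rest ih =>
    intro cnt acc h
    by_cases h0 : cnt + egDelta (PySem.Str.strip l) = 0
    · simp [egB_consume, h0] at h
    · simp only [egB_consume, if_neg h0] at h ⊢
      exact ih _ _ h

-- while A is inside a grouping its fold mirrors egB_consume exactly
theorem inner_eq (exclude : List String) (g : PySem.Dict String String)
    (name : String) (cl : List String) : ∀ (lines : List String) (cnt : Int) (acc : List String),
    egFin (lines.foldl (egA_step exclude) (g, some name, acc, cnt, cl)) =
      (match egB_consume lines cnt acc with
       | (some block, rest) =>
         egFin (rest.foldl (egA_step exclude)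
           (g.insert name (PySem.Str.join "\n" block), none, [], 0, cl))
       | (none, _) => (g, cl)) := by
  intro lines
  induction lines with
  | nil => intro cnt acc; simp [egB_consume, egFin]
  | cons l rest ih =>
    intro cnt acc
    rw [List.foldl_cons, egA_step_inside]
    by_cases h0 : cnt + egDelta (PySem.Str.strip l) = 0
    · rw [if_pos h0]
      simp only [egB_consume, if_pos h0]
      simp [h0]
    · rw [if_neg h0, ih]
      simp only [egB_consume, if_neg h0]

-- A's whole fold (started outside any grouping) equals B's outer loop
theorem outer_eq (exclude : List String) : ∀ (n : Nat) (lines : List String)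
    (g : PySem.Dict String String) (cl : List String), lines.length ≤ n →
    egFin (lines.foldl (egA_step exclude) (g, none, [], 0, cl)) = egB_outer exclude lines g cl := by
  intro n
  induction n with
  | zero =>
    intro lines g cl hlen
    have : lines = [] := List.length_eq_zero_iff.mp (Nat.le_zero.mp hlen)
    subst this; simp [egB_outer, egFin]
  | succ n ih =>
    intro lines g cl hlen
    match lines with
    | [] => simp [egB_outer, egFin]
    | l :: rest =>
      have hr : rest.length ≤ n := Nat.lt_succ_iff.mp (by simpa using hlen)
      by_cases hcond : (PySem.Str.startswith (PySem.Str.strip l) "grouping" &&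
          !(exclude.contains (PySem.List.pyGetD (PySem.Str.split₀ (PySem.Str.strip l)) 1 ""))) = true
      · -- header of a non-excluded grouping
        obtain ⟨hsw, hnex⟩ := Bool.and_eq_true_iff.mp hcond
        have hnex' : exclude.contains
            (PySem.List.pyGetD (PySem.Str.split₀ (PySem.Str.strip l)) 1 "") = false := by
          simpa using hnex
        rw [egB_outer]
        simp only [hcond, if_pos]
        rw [List.foldl_cons, egA_step_header exclude g cl l hsw hnex', egA_step_inside]
        by_cases h0 : (0:Int) + egDelta (PySem.Str.strip l) = 0
        · -- header line closes the grouping immediately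
          rw [if_pos h0, h0]
          simp only [egB_consume, if_pos h0, List.nil_append]
          exact ih rest _ cl hr
        · -- enter the block proper
          rw [if_neg h0, inner_eq]
          simp only [egB_consume, if_neg h0, List.nil_append]
          rcases hcase : egB_consume rest (0 + egDelta (PySem.Str.strip l)) [l] with ⟨ob, rest'⟩
          cases ob with
          | some block =>
            simp only
            refine ih rest' _ cl (le_trans ?_ hr)
            have := egB_consume_len rest (0 + egDelta (PySem.Str.strip l)) [l]
            rw [hcase] at this; simpa using this
          | none =>
            have hrest' : rest' = [] := by
              have := egB_consume_none_rest rest (0 + egDelta (PySem.Str.strip l)) [l]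
                (by rw [hcase])
              rw [hcase] at this; exact this
            subst hrest'
            simp [egB_outer]
      · -- ordinary line (or excluded grouping header): goes to cleaned
        rw [egB_outer]
        simp only [hcond, Bool.false_eq_true, if_false]
        rw [List.foldl_cons, egA_step_plain exclude g cl l (by simpa using hcond)]
        exact ih rest g (cl ++ [l]) hr

-- ===== VERDICT (by name: the statement is the Claim_ definition above) =====
theorem extract_groupings_spec : Claim_equal_extract_groupings := by
  intro yc ex _ _
  unfold Spec_extract_groupings extract_groupings extract_groupings_alt
  have h := outer_eq ex ((PySem.Str.split? yc "\n").getD []).length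
    ((PySem.Str.split? yc "\n").getD []) PySem.Dict.empty [] le_rfl
  simp only [egFin, Prod.ext_iff] at h
  simp only [h.1, h.2]
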